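-- pv_equiv track=rewrite | github.com/Variable-Embedding/nlp-ft | src/stages/stage_get_pre_trained_embedding.py | return_repeating_word
-- ===== SOURCE A (Python) =====
-- def return_repeating_word(values):
--     """A helper function to address issues where word has repeating chargers, return them as a single word.
--
--     :param values: values, a line of embedding text data
--     :return: A string of repeating characters.
--     """
--     word = []
--     first_char = values[0]
--     counter = 1
--     word.append(first_char)
--
--     # while values:
--     for idx, char in enumerate(values[1:]):
--         counter += 1
--         curr_char = char
--         if curr_char == first_char:
--             word.append(curr_char)
--         else:
--             break
--
--     word = ''.join(map(str, word))
--
--     return word, counter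
-- ===== SOURCE B (Python) =====
-- def return_repeating_word(values):
--     first = values[0]
--     n = len(values)
--     i = next((j for j in range(1, n) if values[j] != first), n)
--     return first * i, min(i + 1, n)
-- ===== Notes on version B (the rewrite author's own statement) =====
-- stated objective: alternative
-- what changed: B never accumulates characters or a counter: it searches for the index of the first mismatching character (next over an index range), then produces the word by string replication first*i and the counter by the closed form min(i+1, n).
import Mathlib
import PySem

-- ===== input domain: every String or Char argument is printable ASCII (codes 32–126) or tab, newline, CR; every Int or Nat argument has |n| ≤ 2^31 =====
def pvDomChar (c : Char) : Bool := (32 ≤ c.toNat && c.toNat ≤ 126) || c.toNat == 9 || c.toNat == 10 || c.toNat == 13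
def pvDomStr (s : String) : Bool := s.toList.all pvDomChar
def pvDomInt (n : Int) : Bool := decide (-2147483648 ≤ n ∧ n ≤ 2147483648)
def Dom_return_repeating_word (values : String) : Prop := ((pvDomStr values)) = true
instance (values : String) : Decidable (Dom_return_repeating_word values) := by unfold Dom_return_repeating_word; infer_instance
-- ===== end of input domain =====

-- B accumulates nothing: it finds the index i of the first mismatching character by an index
-- search, builds the word by replication first*i, and gets the counter from min(i+1, n).

-- ===== PORT A =====
-- A's for-loop over values[1:] with break: counts each processed char, appends while equal,
-- stops (counting the mismatching char) at the first difference.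
def pvALoop (first : Char) : List Char → List Char × Int
  | [] => ([], 0)
  | c :: rest =>
    if c == first then
      let r := pvALoop first rest
      (c :: r.1, r.2 + 1)
    else ([], 1)

def return_repeating_word (values : String) : String × Int :=
  match values.toList with
  | [] => ("", 0)  -- unreachable under Pre_ (values[0] raises IndexError on the empty string)
  | first :: rest =>
    let r := pvALoop first rest
    (String.mk (first :: r.1), 1 + r.2)

-- ===== PORT B =====
-- i = next((j for j in range(1, n) if values[j] != first), n); return first * i, min(i + 1, n)
def return_repeating_word_alt (values : String) : String × Int :=
  match values.toList with
  | [] => ("", 0)  -- unreachable under Pre_ (values[0] raises IndexError on the empty string)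
  | _first :: _ =>
    let l := values.toList
    let first := _first
    let n : Int := l.length
    let i : Int :=
      ((PySem.List.pyRange 1 n 1).find? (fun j => !(PySem.List.pyGet? l j == some first))).getD n
    (String.mk (PySem.List.pyRepeat [first] i), min (i + 1) n)

-- ===== PRECONDITION & SPEC =====
-- Pre_ excludes only the empty string, on which both A and B raise IndexError at values[0].
def Pre_return_repeating_word (values : String) : Prop := values.toList ≠ []
instance (values : String) : Decidable (Pre_return_repeating_word values) := by
  unfold Pre_return_repeating_word; infer_instance
def pvWitness_return_repeating_word : String := "aab"

def Spec_return_repeating_word (values : String) (out : String × Int) : Prop := out = return_repeating_word_alt values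
instance (values : String) (out : String × Int) : Decidable (Spec_return_repeating_word values out) := by unfold Spec_return_repeating_word; infer_instance

-- ===== CLAIM =====
def Claim_equal_return_repeating_word : Prop := ∀ (values : String), Dom_return_repeating_word values → Pre_return_repeating_word values → Spec_return_repeating_word values (return_repeating_word values)

-- ===== LEMMAS AND PROOFS =====
-- A's loop result in terms of the takeWhile run of the tail.
theorem pvALoop_eq (first : Char) (rest : List Char) :
    pvALoop first rest =
      (rest.takeWhile (· == first),
       ((rest.takeWhile (· == first)).length : Int) +
         (if ((rest.takeWhile (· == first)).length : Int) < (rest.length : Int) then 1 else 0)) := by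
  induction rest with
  | nil => simp [pvALoop]
  | cons c r ih =>
    by_cases h : c == first
    · simp [pvALoop, h, ih, List.takeWhile]
      split_ifs <;> ring
    · simp [pvALoop, h, List.takeWhile]

-- the prefix run consists of copies of `first`
theorem takeWhile_eq_replicate (first : Char) (rest : List Char) :
    rest.takeWhile (· == first) = List.replicate (rest.takeWhile (· == first)).length first := by
  induction rest with
  | nil => simp
  | cons c r ih =>
    by_cases h : c == first
    · have hc : c = first := eq_of_beq h
      simp [List.takeWhile, h, List.replicate, ih.symm]
      exact hc
    · simp [List.takeWhile, h]

-- B's index search over List.range: the first mismatch index is the takeWhile length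
theorem findRange_eq (first : Char) (rest : List Char) :
    (List.range rest.length).find? (fun k => !(rest[k]? == some first)) =
      if (rest.takeWhile (· == first)).length = rest.length then none
      else some (rest.takeWhile (· == first)).length := by
  induction rest with
  | nil => simp
  | cons c r ih =>
    rw [List.length_cons, List.range_succ_eq_map, List.find?_cons]
    by_cases h : c == first
    · have hc : c = first := eq_of_beq h
      subst hc
      simp only [List.getElem?_cons_zero, beq_self_eq_true, Bool.not_true,
        List.find?_map, Function.comp_def, Nat.succ_eq_add_one, List.getElem?_cons_succ]
      rw [ih, List.takeWhile_cons_of_pos (by simp), List.length_cons]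
      by_cases he : (r.takeWhile (· == c)).length = r.length <;> simp [he]
    · simp [List.takeWhile, h]

-- ===== VERDICT =====
theorem return_repeating_word_spec : Claim_equal_return_repeating_word := by
  intro values _ hpre
  unfold Spec_return_repeating_word return_repeating_word return_repeating_word_alt
  cases hl : values.toList with
  | nil => exact absurd hl hpre
  | cons first rest =>
    simp only [pvALoop_eq]
    set k := (rest.takeWhile (· == first)).length with hk
    -- rewrite B's pyRange find? into the List.range find? of findRange_eq
    have hget : ∀ j : Nat, PySem.List.pyGet? (first :: rest) ((1 : Int) + j) = rest[j]? := by
      intro j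
      have : ((1 : Int) + j) = ((j + 1 : Nat) : Int) := by push_cast; ring
      rw [this, PySem.List.pyGet?_natCast]
      simp
    have hfind :
        ((PySem.List.pyRange 1 ((first :: rest).length : Int) 1).find?
            (fun j => !(PySem.List.pyGet? (first :: rest) j == some first)))
          = if k = rest.length then none else some ((1 : Int) + k) := by
      rw [PySem.List.pyRange_one]
      have h1 : ((((first :: rest).length : Int)) - 1).toNat = rest.length := by simp
      rw [h1, List.find?_map]
      simp only [Function.comp_def, hget]
      rw [findRange_eq, ← hk]
      by_cases he : k = rest.length <;> simp [he]
    simp only [hfind]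
    by_cases he : k = rest.length
    · -- all of the tail matches: i = n
      have htw : rest.takeWhile (· == first) = rest :=
        (List.takeWhile_prefix (p := (· == first))).eq_of_length he
      simp only [if_pos he, Option.getD_none, PySem.List.pyRepeat_singleton, Prod.mk.injEq]
      constructor
      · have hn : (((first :: rest).length : Int)).toNat = rest.length + 1 := by simp
        rw [hn, List.replicate_succ]
        congr 1
        simp only [List.cons.injEq, true_and]
        calc rest.takeWhile (· == first)
            = List.replicate (rest.takeWhile (· == first)).length first :=
              takeWhile_eq_replicate first rest
          _ = List.replicate rest.length first := by rw [← hk, he]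
      · rw [he, if_neg (lt_irrefl _)]
        push_cast [List.length_cons]
        omega
    · -- mismatch at index 1 + k: i = 1 + k
      have hklt : k < rest.length := lt_of_le_of_ne (List.takeWhile_prefix (p := (· == first))).length_le he
      simp only [if_neg he, Option.getD_some, PySem.List.pyRepeat_singleton, Prod.mk.injEq]
      constructor
      · have hi : (((1 : Int) + k)).toNat = k + 1 := by omega
        rw [hi, List.replicate_succ]
        congr 1
        simp only [List.cons.injEq, true_and]
        rw [hk]
        exact takeWhile_eq_replicate first rest
      · have hlt : ((k : Int)) < (rest.length : Int) := by exact_mod_cast hklt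
        rw [if_pos hlt]
        push_cast [List.length_cons]
        omega
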